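-- pv_equiv track=rewrite | github.com/ange1inaxu/boolean-sat-solver | boolean_sat_solver.py | get_oversubscribed
-- ===== SOURCE A (Python) =====
-- def get_combos(elts, length, prev=[]):
--     '''
--     Return list combos, containing all possible combinations with the given length
--     from the list elts using recursion
--     '''
--     if len(prev) == length:
--         return [prev]
--     else:
--         combos = []
--         for i, val in enumerate(elts):
--             prev_copy = prev.copy()
--             prev_copy.append(val)
--             combos += get_combos(elts[i+1:], length, prev_copy)
--     return combos
--
-- def get_oversubscribed(student_preferences, room_capacities):
--     '''
--     Rule 3: No Oversubscribed Sessions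
--     Return CNF list of tuples such that the rooms do not exceed capacity
--     '''
--     students = list(student_preferences.keys())
--     sessions = list(room_capacities.keys())
--
--     oversubscribed = []
--     for session in sessions:
--         capacity = room_capacities[session]
--
--         # only when the number of students exceed a room's capacity
--         if len(students) > capacity:
--             student_combos = get_combos(students, capacity+1)
--
--             temp_oversubscribed = []
--             for combo in student_combos:
--                 temp_oversubscribed.append([(student+"_"+session, False) for student in combo])
--
--             oversubscribed.extend(temp_oversubscribed)
--     return oversubscribed
-- ===== SOURCE B (Python) =====
-- def get_oversubscribed(student_preferences, room_capacities):
--     '''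
--     Rule 3: No Oversubscribed Sessions
--     Return CNF list of tuples such that the rooms do not exceed capacity
--     '''
--     students = list(student_preferences)
--     clauses = []
--     for session in room_capacities:
--         k = room_capacities[session] + 1  # forbid any k students sharing the session
--         if 0 <= k <= len(students):
--             # dp[j] = all j-element combinations (in index order) of the suffix scanned so far
--             dp = [[[]]] + [[] for _ in range(k)]
--             for s in reversed(students):
--                 dp = [dp[0]] + [[[s] + c for c in low] + cur
--                                 for low, cur in zip(dp, dp[1:])]
--             for combo in dp[k]:
--                 clauses.append([(s + "_" + session, False) for s in combo])
--     return clauses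
-- ===== Notes on version B (the rewrite author's own statement) =====
-- stated objective: alternative
-- what changed: The recursive accumulator-based get_combos helper is replaced by an iterative dynamic-programming table dp[j] of all j-element combinations, built in one right-to-left pass over the student list with a zip, producing the same lexicographic order without any recursion.
import Mathlib
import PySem

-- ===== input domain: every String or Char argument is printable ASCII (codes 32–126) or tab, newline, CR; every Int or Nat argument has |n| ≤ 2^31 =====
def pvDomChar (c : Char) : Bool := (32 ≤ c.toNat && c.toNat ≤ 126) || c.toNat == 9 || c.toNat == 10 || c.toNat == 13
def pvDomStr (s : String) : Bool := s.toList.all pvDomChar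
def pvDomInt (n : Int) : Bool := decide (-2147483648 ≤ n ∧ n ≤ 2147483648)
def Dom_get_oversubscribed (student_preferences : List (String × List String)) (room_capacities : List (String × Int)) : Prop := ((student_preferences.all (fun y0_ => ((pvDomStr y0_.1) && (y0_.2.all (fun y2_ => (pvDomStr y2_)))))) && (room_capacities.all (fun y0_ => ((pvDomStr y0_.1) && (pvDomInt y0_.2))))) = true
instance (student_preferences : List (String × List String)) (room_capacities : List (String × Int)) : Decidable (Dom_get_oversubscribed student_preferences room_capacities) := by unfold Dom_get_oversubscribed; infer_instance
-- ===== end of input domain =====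

-- B replaces the recursive combination helper by an iterative DP pass (alternative decomposition, same output).

-- ===== PORT A =====
-- get_combos(elts, length, prev): the enumerate-loop is the structural recursion get_combos_loop.
mutual
def get_combos (elts : List String) (length_ : Int) (prev : List String) : List (List String) :=
  if (prev.length : Int) = length_ then [prev]
  else get_combos_loop elts length_ prev
  termination_by (elts.length, 1)
def get_combos_loop (elts : List String) (length_ : Int) (prev : List String) : List (List String) :=
  match elts with
  | [] => []
  | v :: rest => get_combos rest length_ (prev ++ [v]) ++ get_combos_loop rest length_ prev
  termination_by (elts.length, 0)
end

def get_oversubscribed (student_preferences : List (String × List String)) (room_capacities : List (String × Int)) : List (List (String × Bool)) :=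
  let students := (PySem.Dict.ofList student_preferences).keys
  let caps := PySem.Dict.ofList room_capacities
  let sessions := caps.keys
  sessions.foldl (fun oversubscribed session =>
    let capacity := caps.getD session 0
    if (students.length : Int) > capacity then
      oversubscribed ++ (get_combos students (capacity + 1) []).map
        (fun combo => combo.map (fun student => (student ++ "_" ++ session, false)))
    else oversubscribed) []

-- ===== PORT B =====
-- one DP step: dp ↦ [dp[0]] + [map (s::) low ++ cur for (low, cur) in zip(dp, dp[1:])]
def dp_step (s : String) (dp : List (List (List String))) : List (List (List String)) :=
  match dp with
  | [] => []
  | d0 :: _ => d0 :: (dp.zip dp.tail).map (fun p => p.1.map (fun c => s :: c) ++ p.2)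

def get_oversubscribed_alt (student_preferences : List (String × List String)) (room_capacities : List (String × Int)) : List (List (String × Bool)) :=
  let students := (PySem.Dict.ofList student_preferences).keys
  let caps := PySem.Dict.ofList room_capacities
  caps.keys.foldl (fun clauses session =>
    let k := caps.getD session 0 + 1
    if 0 ≤ k ∧ k ≤ (students.length : Int) then
      let dp0 : List (List (List String)) := [[]] :: List.replicate k.toNat []
      let dp := students.reverse.foldl (fun d s => dp_step s d) dp0
      clauses ++ (dp.getD k.toNat []).map
        (fun combo => combo.map (fun s => (s ++ "_" ++ session, false)))
    else clauses) []

-- ===== PRECONDITION & SPEC =====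
def Spec_get_oversubscribed (student_preferences : List (String × List String)) (room_capacities : List (String × Int)) (out : List (List (String × Bool))) : Prop := out = get_oversubscribed_alt student_preferences room_capacities
instance (student_preferences : List (String × List String)) (room_capacities : List (String × Int)) (out : List (List (String × Bool))) : Decidable (Spec_get_oversubscribed student_preferences room_capacities out) := by unfold Spec_get_oversubscribed; infer_instance

-- ===== CLAIM (what is proved, stated in full; the proofs are below) =====
def Claim_equal_get_oversubscribed : Prop := ∀ (student_preferences : List (String × List String)) (room_capacities : List (String × Int)), Dom_get_oversubscribed student_preferences room_capacities → Spec_get_oversubscribed student_preferences room_capacities (get_oversubscribed student_preferences room_capacities)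

-- ===== LEMMAS AND PROOFS =====

-- reference: combinations of xs of size k, in lexicographic index order
def comb (xs : List String) (k : Int) : List (List String) :=
  if k = 0 then [[]]
  else
    match xs with
    | [] => []
    | x :: r => (comb r (k - 1)).map (fun c => x :: c) ++ comb r k

lemma comb_neg (xs : List String) (k : Int) (hk : k < 0) : comb xs k = [] := by
  induction xs generalizing k with
  | nil => unfold comb; simp [show k ≠ 0 by omega]
  | cons x r ih =>
      unfold comb
      simp [show k ≠ 0 by omega, ih (k - 1) (by omega), ih k hk]

lemma comb_zero (xs : List String) : comb xs 0 = [[]] := by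
  unfold comb; simp

lemma get_combos_loop_eq (xs : List String) (L : Int) (prev : List String)
    (h : (prev.length : Int) ≠ L) :
    get_combos_loop xs L prev = (comb xs (L - prev.length)).map (fun c => prev ++ c) := by
  induction xs generalizing prev with
  | nil =>
      unfold get_combos_loop comb
      simp [show L - (prev.length : Int) ≠ 0 by omega]
  | cons v rest ih =>
      unfold get_combos_loop
      rw [get_combos]
      by_cases h1 : ((prev ++ [v]).length : Int) = L
      · have hL : L - (prev.length : Int) = 1 := by simp at h1; omega
        rw [if_pos h1, ih prev h, hL]
        conv_rhs => rw [comb]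
        rw [if_neg one_ne_zero]
        simp [comb_zero]
      · rw [if_neg h1, ih (prev ++ [v]) h1, ih prev h]
        have h2 : L - ((prev ++ [v]).length : Int) = L - prev.length - 1 := by
          simp; omega
        rw [h2]
        conv_rhs => rw [comb]
        rw [if_neg (by omega), List.map_append, List.map_map]
        congr 1
        apply List.map_congr_left
        intro c _
        simp

lemma get_combos_nil_prev (xs : List String) (L : Int) :
    get_combos xs L [] = comb xs L := by
  rw [get_combos]
  by_cases h : ((List.length ([] : List String)) : Int) = L
  · simp at h
    rw [if_pos (by simpa using h.symm ▸ rfl)]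
    unfold comb
    simp [← h]
  · rw [if_neg h, get_combos_loop_eq xs L [] h]
    simp

-- dp invariant: table of combinations of every size up to kn
def DPInv (dp : List (List (List String))) (xs : List String) (kn : Nat) : Prop :=
  dp.length = kn + 1 ∧ ∀ j : Nat, j ≤ kn → dp.getD j [] = comb xs (j : Int)

lemma DPInv_init (kn : Nat) : DPInv ([[]] :: List.replicate kn []) [] kn := by
  constructor
  · simp
  · intro j hj
    cases j with
    | zero => simp [comb_zero]
    | succ m =>
        have hm : m < kn := by omega
        unfold comb
        simp [show ((m : Int) + 1) ≠ 0 by omega, List.getD, hm]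

lemma DPInv_step (dp : List (List (List String))) (xs : List String) (kn : Nat) (s : String)
    (h : DPInv dp xs kn) : DPInv (dp_step s dp) (s :: xs) kn := by
  obtain ⟨hlen, hget⟩ := h
  obtain ⟨d0, dtl, rfl⟩ : ∃ d0 dtl, dp = d0 :: dtl := by
    cases dp with
    | nil => simp at hlen
    | cons a b => exact ⟨a, b, rfl⟩
  constructor
  · simp [dp_step, List.length_zip]
    simp at hlen
    omega
  · intro j hj
    cases j with
    | zero =>
        have := hget 0 (by omega)
        simpa [dp_step, comb_zero] using by simpa [comb_zero] using this
    | succ m =>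
        have hmz : m < ((d0 :: dtl).zip dtl).length := by simp [List.length_zip] at hlen ⊢; omega
        have hgetz : ((d0 :: dtl).zip dtl)[m] = ((d0 :: dtl)[m]'(by omega), dtl[m]'(by simp [List.length_zip] at hmz hlen ⊢; omega)) := by
          exact List.getElem_zip
        show (((d0 :: dtl).zip dtl).map (fun p => p.1.map (fun c => s :: c) ++ p.2)).getD m [] = _
        rw [List.getD_eq_getElem _ _ (by simpa using hmz)]
        simp only [List.getElem_map, hgetz]
        have e1 : (d0 :: dtl)[m]'(by omega) = comb xs m := by
          have := hget m (by omega)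
          rwa [List.getD_eq_getElem _ _ (by omega)] at this
        have e2 : dtl[m]'(by simp [List.length_zip] at hmz hlen ⊢; omega) = comb xs (m + 1 : Nat) := by
          have := hget (m + 1) (by omega)
          rw [List.getD_eq_getElem _ _ (by omega)] at this
          simpa using this
        rw [e1, e2]
        conv_rhs => rw [comb]
        rw [if_neg (by push_cast; omega),
          show (((m + 1 : Nat)) : Int) - 1 = (m : Int) by push_cast; ring]

lemma DPInv_fold (xs : List String) (kn : Nat) :
    DPInv (xs.reverse.foldl (fun d s => dp_step s d) ([[]] :: List.replicate kn [])) xs kn := by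
  rw [List.foldl_reverse]
  induction xs with
  | nil => exact DPInv_init kn
  | cons s rest ih =>
      simpa using DPInv_step _ rest kn s ih

-- per-session branches agree
lemma branch_eq (students : List String) (c : Int) (session : String)
    (acc : List (List (String × Bool))) :
    (if (students.length : Int) > c then
      acc ++ (get_combos students (c + 1) []).map
        (fun combo => combo.map (fun student => (student ++ "_" ++ session, false)))
    else acc)
    =
    (if 0 ≤ c + 1 ∧ c + 1 ≤ (students.length : Int) then
      let dp0 : List (List (List String)) := [[]] :: List.replicate (c + 1).toNat []
      let dp := students.reverse.foldl (fun d s => dp_step s d) dp0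
      acc ++ (dp.getD (c + 1).toNat []).map
        (fun combo => combo.map (fun s => (s ++ "_" ++ session, false)))
    else acc) := by
  by_cases hneg : c + 1 < 0
  · rw [if_pos (by omega), if_neg (by omega), get_combos_nil_prev, comb_neg _ _ hneg]
    simp
  · by_cases hle : c + 1 ≤ (students.length : Int)
    · rw [if_pos (by omega), if_pos ⟨by omega, hle⟩]
      obtain ⟨_, hget⟩ := DPInv_fold students (c + 1).toNat
      dsimp only
      rw [hget (c + 1).toNat (le_refl _), get_combos_nil_prev,
        show (((c + 1).toNat : Int)) = c + 1 from by omega]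
    · rw [if_neg (by omega), if_neg (by tauto)]

-- ===== VERDICT (by name: the statement is the Claim_ definition above) =====
theorem get_oversubscribed_spec : Claim_equal_get_oversubscribed := by
  intro sp rc _
  unfold Spec_get_oversubscribed get_oversubscribed get_oversubscribed_alt
  apply PySem.List.foldl_congr_mem
  intro acc session _
  exact branch_eq _ _ session acc
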